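-- pv_equiv track=rewrite | github.com/benwr/shuffling | shuffling.py | count_piles
-- ===== SOURCE A (Python) =====
-- def count_piles(p):
--     piles = []
--     for i in p:
--         found_pile = False
--         for pile in piles:
--             if pile[-1] == i - 1:
--                 pile.append(i)
--                 found_pile = True
--         if not found_pile:
--             piles.append([i])
--     return len(piles)
-- ===== SOURCE B (Python) =====
-- def count_piles(p):
--     # O(n): count piles by the value at their top; no pile lists are kept.
--     last = {}
--     total = 0
--     for i in p:
--         c = last.get(i - 1, 0)
--         if c:
--             last[i - 1] = 0
--             last[i] = last.get(i, 0) + c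
--         else:
--             last[i] = last.get(i, 0) + 1
--             total += 1
--     return total
-- ===== Notes on version B (the rewrite author's own statement) =====
-- stated objective: faster
-- what changed: B replaces A's list of explicit piles and the inner scan over all piles with a dict mapping each pile's top value to the number of piles topped by it, updated in O(1) per element; only a running total of piles is kept.
import Mathlib
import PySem

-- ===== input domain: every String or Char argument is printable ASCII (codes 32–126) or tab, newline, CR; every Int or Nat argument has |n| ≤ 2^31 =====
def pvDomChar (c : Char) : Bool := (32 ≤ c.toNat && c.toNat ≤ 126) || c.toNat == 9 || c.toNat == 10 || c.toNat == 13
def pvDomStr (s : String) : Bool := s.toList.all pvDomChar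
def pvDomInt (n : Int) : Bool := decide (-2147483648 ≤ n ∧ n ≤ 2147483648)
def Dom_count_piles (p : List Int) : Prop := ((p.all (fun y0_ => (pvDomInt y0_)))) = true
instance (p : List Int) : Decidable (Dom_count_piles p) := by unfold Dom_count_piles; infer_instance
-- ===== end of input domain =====

-- B replaces A's quadratic scan of all piles with a dict keyed by each pile's top value,
-- updated incrementally; only the number of piles per top value is kept (objective: faster, O(n)).

-- ===== PORT A =====
-- loop body of A's outer 'for i in p' (inner 'for pile in piles' as a fold over (piles-so-far, found_pile))
def pvStepA (piles : List (List Int)) (i : Int) : List (List Int) :=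
  let st := piles.foldl (fun (st : List (List Int) × Bool) pile =>
      if PySem.List.pyGetD pile (-1) 0 == i - 1 then (st.1 ++ [pile ++ [i]], true)
      else (st.1 ++ [pile], st.2)) ([], false)
  if st.2 then st.1 else st.1 ++ [[i]]

def count_piles (p : List Int) : Int :=
  ((p.foldl pvStepA []).length : Int)

-- ===== PORT B =====
-- loop body of B's 'for i in p' over the state (last, total)
def pvStepB (st : PySem.Dict Int Int × Int) (i : Int) : PySem.Dict Int Int × Int :=
  let c := st.1.getD (i - 1) 0
  if c ≠ 0 then
    let d1 := st.1.insert (i - 1) 0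
    (d1.insert i (d1.getD i 0 + c), st.2)
  else
    (st.1.insert i (st.1.getD i 0 + 1), st.2 + 1)

def count_piles_alt (p : List Int) : Int :=
  (p.foldl pvStepB (PySem.Dict.empty, 0)).2

-- ===== PRECONDITION & SPEC =====
def Spec_count_piles (p : List Int) (out : Int) : Prop := out = count_piles_alt p
instance (p : List Int) (out : Int) : Decidable (Spec_count_piles p out) := by unfold Spec_count_piles; infer_instance

-- ===== CLAIM (what is proved, stated in full; the proofs are below) =====
def Claim_equal_count_piles : Prop := ∀ (p : List Int), Dom_count_piles p → Spec_count_piles p (count_piles p)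

-- ===== LEMMAS AND PROOFS =====

-- number of piles whose top value is v
def pvCnt (v : Int) (piles : List (List Int)) : Nat :=
  piles.countP (fun pile => PySem.List.pyGetD pile (-1) 0 == v)

lemma pvInnerA (i : Int) (piles : List (List Int)) (acc : List (List Int)) (f0 : Bool) :
    piles.foldl (fun (st : List (List Int) × Bool) pile =>
        if PySem.List.pyGetD pile (-1) 0 == i - 1 then (st.1 ++ [pile ++ [i]], true)
        else (st.1 ++ [pile], st.2)) (acc, f0)
    = (acc ++ piles.map (fun pile =>
          if PySem.List.pyGetD pile (-1) 0 == i - 1 then pile ++ [i] else pile),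
       f0 || piles.any (fun pile => PySem.List.pyGetD pile (-1) 0 == i - 1)) := by
  induction piles generalizing acc f0 with
  | nil => simp
  | cons a l ih =>
    simp only [List.foldl_cons, List.map_cons, List.any_cons]
    by_cases h : (PySem.List.pyGetD a (-1) 0 == i - 1) = true
    · rw [if_pos h, if_pos h, ih]; simp [h]
    · rw [if_neg h, if_neg h, ih]; simp [Bool.eq_false_iff.mpr h]

lemma pvCnt_cons (w : Int) (a : List Int) (l : List (List Int)) :
    pvCnt w (a :: l) = pvCnt w l + (if PySem.List.pyGetD a (-1) 0 = w then 1 else 0) := by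
  simp [pvCnt, List.countP_cons, beq_iff_eq]

lemma pvCnt_append_new (w i : Int) (l : List (List Int)) :
    pvCnt w (l ++ [[i]]) = pvCnt w l + (if w = i then 1 else 0) := by
  have hlast : PySem.List.pyGetD ([i] : List Int) (-1) 0 = i := by
    simpa using PySem.List.pyGetD_neg_one_append_singleton ([] : List Int) i 0
  rcases eq_or_ne w i with h | h
  · subst h; simp [pvCnt, List.countP_append, hlast]
  · simp [pvCnt, List.countP_append, hlast, beq_iff_eq, h, Ne.symm h]

lemma pvCnt_map (i v : Int) (piles : List (List Int)) :
    pvCnt v (piles.map (fun pile =>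
        if PySem.List.pyGetD pile (-1) 0 == i - 1 then pile ++ [i] else pile)) =
      if v = i then pvCnt i piles + pvCnt (i - 1) piles
      else if v = i - 1 then 0 else pvCnt v piles := by
  induction piles with
  | nil => simp [pvCnt]
  | cons a l ih =>
    rw [List.map_cons]
    by_cases h : PySem.List.pyGetD a (-1) 0 = i - 1
    · rw [if_pos (by simpa [beq_iff_eq] using h)]
      simp only [pvCnt_cons, ih, PySem.List.pyGetD_neg_one_append_singleton, h]
      split_ifs <;> omega
    · rw [if_neg (by simpa [beq_iff_eq] using h)]
      simp only [pvCnt_cons, ih]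
      generalize hx : PySem.List.pyGetD a (-1) 0 = x
      rw [hx] at h
      split_ifs <;> omega

lemma pvCnt_any (i : Int) (piles : List (List Int)) :
    (piles.any (fun pile => PySem.List.pyGetD pile (-1) 0 == i - 1)) = true ↔
      pvCnt (i - 1) piles ≠ 0 := by
  unfold pvCnt
  rw [List.any_eq_true, ← List.countP_pos_iff]
  omega

lemma pvLoopInv : ∀ (p : List Int) (piles : List (List Int)) (d : PySem.Dict Int Int) (t : Int),
    t = (piles.length : Int) →
    (∀ v, d.getD v 0 = (pvCnt v piles : Int)) →
    (p.foldl pvStepB (d, t)).2 = ((p.foldl pvStepA piles).length : Int) := by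
  intro p
  induction p with
  | nil => intro piles d t ht hd; simpa using ht
  | cons i rest ih =>
    intro piles d t ht hd
    simp only [List.foldl_cons]
    have hc : d.getD (i - 1) 0 = (pvCnt (i - 1) piles : Int) := hd (i - 1)
    have hA : pvStepA piles i =
        (if piles.any (fun pile => PySem.List.pyGetD pile (-1) 0 == i - 1) then
          piles.map (fun pile =>
            if PySem.List.pyGetD pile (-1) 0 == i - 1 then pile ++ [i] else pile)
        else piles.map (fun pile =>
            if PySem.List.pyGetD pile (-1) 0 == i - 1 then pile ++ [i] else pile) ++ [[i]]) := by
      unfold pvStepA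
      rw [pvInnerA i piles [] false]
      simp only [Bool.false_or, List.nil_append]
    by_cases hnz : pvCnt (i - 1) piles = 0
    · -- no pile matched: new pile created on both sides
      have hany : (piles.any (fun pile => PySem.List.pyGetD pile (-1) 0 == i - 1)) = false := by
        rw [← Bool.not_eq_true, pvCnt_any]; simp [hnz]
      have hB : pvStepB (d, t) i = (d.insert i (d.getD i 0 + 1), t + 1) := by
        simp [pvStepB, hc, hnz]
      rw [hB, hA, hany, if_neg Bool.false_ne_true]
      apply ih
      · simp [ht]
      · intro v
        rw [PySem.Dict.getD_insert, pvCnt_append_new, pvCnt_map i v piles]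
        split_ifs with hv h2
        · subst hv; simp only [hd]; push_cast; omega
        · subst h2; simp [hd, hnz]
        · simp [hd]
    · -- some pile matched: all matching piles extended, counts move from i-1 to i
      have hany : (piles.any (fun pile => PySem.List.pyGetD pile (-1) 0 == i - 1)) = true := by
        rw [pvCnt_any]; exact hnz
      have hcne : d.getD (i - 1) 0 ≠ 0 := by
        rw [hc]; exact_mod_cast Nat.cast_ne_zero.mpr hnz
      have hB : pvStepB (d, t) i =
          ((d.insert (i - 1) 0).insert i ((d.insert (i - 1) 0).getD i 0 + d.getD (i - 1) 0), t) := by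
        simp [pvStepB, hcne]
      rw [hB, hA, hany, if_pos rfl]
      apply ih
      · simpa using ht
      · intro v
        rw [PySem.Dict.getD_insert, pvCnt_map i v piles]
        have hne : i ≠ i - 1 := by omega
        split_ifs with hv h2
        · rw [PySem.Dict.getD_insert, if_neg hne, hd i, hc]; push_cast; ring
        · rw [PySem.Dict.getD_insert, if_pos h2]; simp
        · rw [PySem.Dict.getD_insert, if_neg h2, hd v]

-- ===== VERDICT (by name: the statement is the Claim_ definition above) =====
theorem count_piles_spec : Claim_equal_count_piles := by
  intro p _
  unfold Spec_count_piles count_piles count_piles_alt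
  exact (pvLoopInv p [] PySem.Dict.empty 0 (by simp) (by simp [pvCnt])).symm
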